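-- pv_equiv track=rewrite | github.com/manwar/perlweeklychallenge-club | challenge-341/sgreen/python/ch-1.py | broken_keyboard
-- ===== SOURCE A (Python) =====
-- def broken_keyboard(input_string: str, broken_keys: list[str]) -> int:
--     """
--     Count the number of words that can be completely typed on a broken keyboard.
--
--     Args:
--         input_string (str): The input string containing words separated by spaces.
--         broken_keys (list[str]): A list of broken keys (characters).
--
--     Returns:
--         int: The number of words that can be fully typed without using any broken keys.
--     """
--
--     # Convert everything to lower case
--     input_string = input_string.lower()
--     broken_keys = [key.lower() for key in broken_keys]
--
--     # Count words that DON'T contain any broken keys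
--     completed_words = 0
--     for word in input_string.split():
--         if not any(char in broken_keys for char in word):
--             completed_words += 1
--
--     return completed_words
-- ===== SOURCE B (Python) =====
-- def broken_keyboard(input_string: str, broken_keys: list[str]) -> int:
--     """Single-pass streaming state machine: no split(), no per-word rescan."""
--     broken = {key.lower() for key in broken_keys}
--     count = 0
--     in_word = False
--     word_ok = True
--     for ch in input_string.lower():
--         if ch.isspace():
--             if in_word and word_ok:
--                 count += 1
--             in_word = False
--             word_ok = True
--         else:
--             in_word = True
--             if ch in broken:
--                 word_ok = False
--     if in_word and word_ok:
--         count += 1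
--     return count
-- ===== Notes on version B (the rewrite author's own statement) =====
-- stated objective: faster
-- what changed: Replaces split() plus a per-word any() rescan with list membership by a single character-by-character streaming pass maintaining (count, in_word, word_ok) flags against a prebuilt set of lowered broken keys, committing a word at each whitespace boundary.
import Mathlib
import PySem

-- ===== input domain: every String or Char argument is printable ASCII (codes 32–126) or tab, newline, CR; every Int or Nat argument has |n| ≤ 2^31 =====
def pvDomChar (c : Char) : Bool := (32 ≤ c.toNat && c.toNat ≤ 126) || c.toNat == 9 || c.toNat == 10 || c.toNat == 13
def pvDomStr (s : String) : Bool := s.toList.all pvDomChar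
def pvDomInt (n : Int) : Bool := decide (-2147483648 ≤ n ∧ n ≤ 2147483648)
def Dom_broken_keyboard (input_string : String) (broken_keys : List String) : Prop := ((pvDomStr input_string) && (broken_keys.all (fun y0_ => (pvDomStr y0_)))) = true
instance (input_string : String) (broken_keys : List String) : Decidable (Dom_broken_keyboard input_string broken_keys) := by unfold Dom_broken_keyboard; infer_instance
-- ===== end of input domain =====

-- ===== PORT A =====
-- B replaces split()+per-word rescanning with one streaming pass over the characters (same O(n) cost, simpler traversal).
-- Port of A: lowercase, split on whitespace, count words with no char in the lowered broken-key list.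
def broken_keyboard (input_string : String) (broken_keys : List String) : Int :=
  let ls := (PySem.Str.lower input_string).toList
  let lk := broken_keys.map PySem.Str.lower
  (PySem.Chars.split₀ ls).foldl
    (fun acc w => if w.any (fun c => lk.contains (String.ofList [c])) then acc else acc + 1) 0

-- ===== PORT B =====
-- one loop step of B's state machine: state = (count, in_word, word_ok)
def bkStep (bad : Char → Bool) (st : Int × Bool × Bool) (c : Char) : Int × Bool × Bool :=
  if PySem.Chars.isspace c then
    (if st.2.1 && st.2.2 then st.1 + 1 else st.1, false, true)
  else
    (st.1, true, if bad c then false else st.2.2)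

def broken_keyboard_alt (input_string : String) (broken_keys : List String) : Int :=
  let broken : PySem.Set String := PySem.Set.ofList (broken_keys.map PySem.Str.lower)
  let bad : Char → Bool := fun c => broken.contains (String.ofList [c])
  let st := (PySem.Str.lower input_string).toList.foldl (bkStep bad) (0, false, true)
  if st.2.1 && st.2.2 then st.1 + 1 else st.1

-- ===== PRECONDITION & SPEC =====
def Spec_broken_keyboard (input_string : String) (broken_keys : List String) (out : Int) : Prop := out = broken_keyboard_alt input_string broken_keys
instance (input_string : String) (broken_keys : List String) (out : Int) : Decidable (Spec_broken_keyboard input_string broken_keys out) := by unfold Spec_broken_keyboard; infer_instance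

-- ===== CLAIM (what is proved, stated in full; the proofs are below) =====
def Claim_equal_broken_keyboard : Prop := ∀ (input_string : String) (broken_keys : List String), Dom_broken_keyboard input_string broken_keys → Spec_broken_keyboard input_string broken_keys (broken_keyboard input_string broken_keys)

-- ===== LEMMAS AND PROOFS =====

-- the accumulator of split₀.go is a reversed prefix of the output
lemma split0_go_acc (cs : List Char) : ∀ (cur : List Char) (acc : List (List Char)),
    PySem.Chars.split₀.go cs cur acc = acc.reverse ++ PySem.Chars.split₀.go cs cur [] := by
  induction cs with
  | nil =>
      intro cur acc
      simp only [PySem.Chars.split₀.go]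
      by_cases h : cur.isEmpty <;> simp [h]
  | cons c rest ih =>
      intro cur acc
      simp only [PySem.Chars.split₀.go]
      by_cases hs : PySem.Chars.isspace c
      · by_cases h : cur.isEmpty
        · simp only [hs, h]
          exact ih [] acc
        · simp only [hs, h, if_true, if_false, Bool.false_eq_true]
          rw [ih [] (cur.reverse :: acc), ih [] [cur.reverse]]
          simp
      · simp only [hs, Bool.false_eq_true, ite_false]
        exact ih (c :: cur) acc

-- the streaming fold computes the split-based count, for any bad-char predicate
lemma stream_eq_split (p : Char → Bool) (cs : List Char) : ∀ (cur : List Char) (n : Int),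
    (let st := cs.foldl (bkStep p) (n, !cur.isEmpty, !(cur.any p));
      if st.2.1 && st.2.2 then st.1 + 1 else st.1)
    = (PySem.Chars.split₀.go cs cur []).foldl
        (fun acc w => if w.any p then acc else acc + 1) n := by
  induction cs with
  | nil =>
      intro cur n
      simp only [List.foldl_nil, PySem.Chars.split₀.go]
      by_cases h : cur.isEmpty
      · simp [h]
      · rw [if_neg h, List.reverse_singleton, List.foldl_cons, List.foldl_nil,
          List.any_reverse]
        cases hp : cur.any p <;> simp [h, hp]
  | cons c rest ih =>
      intro cur n
      simp only [List.foldl_cons, PySem.Chars.split₀.go]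
      by_cases hs : PySem.Chars.isspace c
      · by_cases h : cur.isEmpty
        · have : bkStep p (n, !cur.isEmpty, !(cur.any p)) c = (n, false, true) := by
            simp [bkStep, hs, h]
          rw [this, hs, if_pos rfl, if_pos h]
          simpa using ih [] n
        · have hb : bkStep p (n, !cur.isEmpty, !(cur.any p)) c
              = ((if cur.any p then n else n + 1), false, true) := by
            by_cases hp : cur.any p <;> simp [bkStep, hs, h, hp]
          rw [hb, hs, if_pos rfl, if_neg h,
            split0_go_acc rest [] [cur.reverse]]
          have := ih [] (if cur.any p then n else n + 1)
          simpa [List.any_reverse] using this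
      · have hb : bkStep p (n, !cur.isEmpty, !(cur.any p)) c
            = (n, !(c :: cur).isEmpty, !((c :: cur).any p)) := by
          by_cases hp : p c <;> simp [bkStep, hs, hp]
        rw [hb, if_neg hs]
        exact ih (c :: cur) n

-- the two bad-char tests agree: membership in the built set = membership in the lowered list
lemma bad_eq (l : List String) (x : String) :
    (PySem.Set.ofList l).contains x = l.contains x := by
  rw [Bool.eq_iff_iff]
  simp only [PySem.Set.contains, List.contains_iff_mem]
  exact PySem.Set.mem_ofList l x

-- ===== VERDICT (by name: the statement is the Claim_ definition above) =====
theorem broken_keyboard_spec : Claim_equal_broken_keyboard := by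
  intro s keys _
  unfold Spec_broken_keyboard broken_keyboard broken_keyboard_alt PySem.Chars.split₀
  simp only [bad_eq]
  exact (stream_eq_split _ (PySem.Str.lower s).toList [] 0).symm
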